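-- pv_equiv track=rewrite | github.com/Dilan1234321/dilly-workspace | dilly_core/ats_analysis.py | _check_sections
-- ===== SOURCE A (Python) =====
-- from typing import Dict, List, Optional, Tuple
--
-- def _check_sections(
--     sections: Dict[str, str], track: Optional[str] = None,
-- ) -> Tuple[List[str], List[str]]:
--     """Return (detected_sections, missing_sections)."""
--     section_keys = {k.lower().strip() for k in sections if k != "_top"}
--
--     detected = []
--     for k in sorted(section_keys):
--         detected.append(k.title())
--
--     missing = []
--
--     # Check education
--     has_edu = any(any(ek in k for ek in ("education", "academic", "qualification"))
--                   for k in section_keys)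
--     if not has_edu:
--         missing.append("Education")
--
--     # Check experience
--     has_exp = any(any(ek in k for ek in ("experience", "employment", "work"))
--                   for k in section_keys)
--     if not has_exp:
--         missing.append("Experience")
--
--     # Check skills
--     has_skills = any(any(sk in k for sk in ("skill", "competenc", "technical"))
--                      for k in section_keys)
--     if not has_skills:
--         missing.append("Skills")
--
--     # Track-specific recommendations
--     if track:
--         track_lower = track.lower()
--         if "tech" in track_lower and not any("project" in k for k in section_keys):
--             missing.append("Projects (recommended for Tech)")
--         if "pre-health" in track_lower and not any("research" in k or "clinical" in k for k in section_keys):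
--             missing.append("Research or Clinical Experience (recommended for Pre-Health)")
--         if "pre-law" in track_lower and not any("research" in k or "publication" in k for k in section_keys):
--             missing.append("Research or Publications (recommended for Pre-Law)")
--
--     return detected, missing
-- ===== SOURCE B (Python) =====
-- from typing import Dict, List, Optional, Tuple
--
-- def _check_sections(
--     sections: Dict[str, str], track: Optional[str] = None,
-- ) -> Tuple[List[str], List[str]]:
--     """Return (detected_sections, missing_sections)."""
--     keys = set()
--     edu = exp = skl = proj = res = clin = pub = False
--     for k in sections:
--         if k == "_top":
--             continue
--         kk = k.lower().strip()
--         keys.add(kk)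
--         edu = edu or "education" in kk or "academic" in kk or "qualification" in kk
--         exp = exp or "experience" in kk or "employment" in kk or "work" in kk
--         skl = skl or "skill" in kk or "competenc" in kk or "technical" in kk
--         proj = proj or "project" in kk
--         res = res or "research" in kk
--         clin = clin or "clinical" in kk
--         pub = pub or "publication" in kk
--
--     detected = [k.title() for k in sorted(keys)]
--
--     missing = []
--     if not edu:
--         missing.append("Education")
--     if not exp:
--         missing.append("Experience")
--     if not skl:
--         missing.append("Skills")
--     if track:
--         t = track.lower()
--         if "tech" in t and not proj:
--             missing.append("Projects (recommended for Tech)")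
--         if "pre-health" in t and not (res or clin):
--             missing.append("Research or Clinical Experience (recommended for Pre-Health)")
--         if "pre-law" in t and not (res or pub):
--             missing.append("Research or Publications (recommended for Pre-Law)")
--     return detected, missing
-- ===== Notes on version B (the rewrite author's own statement) =====
-- stated objective: alternative
-- what changed: B makes a single pass over the dict keys, building the normalized key-set and all seven section flags at once, instead of A's separate any(...) scans over the key-set for each category; the missing list is then assembled from the flags.
import Mathlib
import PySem

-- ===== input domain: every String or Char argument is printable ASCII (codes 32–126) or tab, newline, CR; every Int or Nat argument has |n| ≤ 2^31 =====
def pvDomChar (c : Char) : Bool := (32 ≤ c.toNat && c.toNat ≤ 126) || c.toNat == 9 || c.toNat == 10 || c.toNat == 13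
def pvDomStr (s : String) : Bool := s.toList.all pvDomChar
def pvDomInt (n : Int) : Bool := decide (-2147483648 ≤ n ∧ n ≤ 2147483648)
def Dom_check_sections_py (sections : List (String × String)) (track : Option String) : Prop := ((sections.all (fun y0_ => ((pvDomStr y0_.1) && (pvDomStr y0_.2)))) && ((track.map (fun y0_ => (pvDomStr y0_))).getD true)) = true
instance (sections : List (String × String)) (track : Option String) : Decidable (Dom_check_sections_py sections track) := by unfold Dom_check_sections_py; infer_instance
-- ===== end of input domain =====

-- B computes all seven section flags in ONE pass over the dict keys (while building the
-- normalized key-set), instead of A's separate any(...) scans over the key-set per category;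
-- objective: alternative decomposition, same asymptotic cost.

-- hand port of str.title() on the ASCII domain: a letter after a non-letter is uppercased,
-- a letter after a letter is lowercased, other characters pass through (exact for ASCII input)
def pyTitleGo : Bool → List Char → List Char
  | _, [] => []
  | prevCased, c :: rest =>
    if c.isAlpha then
      (if prevCased then c.toLower else c.toUpper) :: pyTitleGo true rest
    else
      c :: pyTitleGo false rest

def pyTitle (s : String) : String := String.ofList (pyTitleGo false s.toList)

-- k.lower().strip()  (shared normalization helper, used by both Pythons verbatim)
def pvNorm (k : String) : String := PySem.Str.strip (PySem.Str.lower k)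

-- the normalized keys of the iterated dict keys (the body of A's set comprehension)
def pvMapped (ks : List String) : List String := (ks.filter (fun k => k ≠ "_top")).map pvNorm

-- {k.lower().strip() for k in sections if k != "_top"}
def pvKeys (sections : List (String × String)) : PySem.Set String :=
  PySem.Set.ofList (pvMapped (sections.map Prod.fst))

-- ===== PORT A =====
def check_sections_py (sections : List (String × String)) (track : Option String) : List String × List String :=
  let section_keys : PySem.Set String := pvKeys sections
  let detected := (PySem.List.sorted section_keys (fun x => x) false).foldl
    (fun acc k => acc ++ [pyTitle k]) []
  let has_edu := section_keys.any (fun k =>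
    (["education", "academic", "qualification"] : List String).any (fun ek => PySem.Str.isIn ek k))
  let has_exp := section_keys.any (fun k =>
    (["experience", "employment", "work"] : List String).any (fun ek => PySem.Str.isIn ek k))
  let has_skills := section_keys.any (fun k =>
    (["skill", "competenc", "technical"] : List String).any (fun sk => PySem.Str.isIn sk k))
  -- the sequence of conditional missing.append(...) statements, as one concatenation
  let missing := (if !has_edu then ["Education"] else [])
    ++ (if !has_exp then ["Experience"] else [])
    ++ (if !has_skills then ["Skills"] else [])
  match track with
  | none => (detected, missing)
  | some t =>
    if t = "" then (detected, missing)
    else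
      let track_lower := PySem.Str.lower t
      (detected, missing
        ++ (if PySem.Str.isIn "tech" track_lower
              && !(section_keys.any (fun k => PySem.Str.isIn "project" k))
            then ["Projects (recommended for Tech)"] else [])
        ++ (if PySem.Str.isIn "pre-health" track_lower
              && !(section_keys.any (fun k => PySem.Str.isIn "research" k || PySem.Str.isIn "clinical" k))
            then ["Research or Clinical Experience (recommended for Pre-Health)"] else [])
        ++ (if PySem.Str.isIn "pre-law" track_lower
              && !(section_keys.any (fun k => PySem.Str.isIn "research" k || PySem.Str.isIn "publication" k))
            then ["Research or Publications (recommended for Pre-Law)"] else []))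

-- ===== PORT B =====
-- flag predicates of Source B's single loop
def pvEdu (k : String) : Bool :=
  PySem.Str.isIn "education" k || PySem.Str.isIn "academic" k || PySem.Str.isIn "qualification" k
def pvExp (k : String) : Bool :=
  PySem.Str.isIn "experience" k || PySem.Str.isIn "employment" k || PySem.Str.isIn "work" k
def pvSkl (k : String) : Bool :=
  PySem.Str.isIn "skill" k || PySem.Str.isIn "competenc" k || PySem.Str.isIn "technical" k

-- one step of Source B's single pass: state = (key set, edu, exp, skl, proj, res, clin, pub)
def bStep (st : PySem.Set String × Bool × Bool × Bool × Bool × Bool × Bool × Bool) (k : String) :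
    PySem.Set String × Bool × Bool × Bool × Bool × Bool × Bool × Bool :=
  if k = "_top" then st
  else
    let kk := pvNorm k
    match st with
    | (s, e, x, sk, p, r, c, pb) =>
      (PySem.Set.add s kk,
       e || pvEdu kk,
       x || pvExp kk,
       sk || pvSkl kk,
       p || PySem.Str.isIn "project" kk,
       r || PySem.Str.isIn "research" kk,
       c || PySem.Str.isIn "clinical" kk,
       pb || PySem.Str.isIn "publication" kk)

def check_sections_py_alt (sections : List (String × String)) (track : Option String) : List String × List String :=
  match sections.foldl (fun st kv => bStep st kv.1)
      (([] : PySem.Set String), false, false, false, false, false, false, false) with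
  | (keys, edu, exp, skl, proj, res, clin, pub) =>
    let detected := (PySem.List.sorted keys (fun x => x) false).map pyTitle
    let missing := (if !edu then ["Education"] else [])
      ++ (if !exp then ["Experience"] else [])
      ++ (if !skl then ["Skills"] else [])
    match track with
    | none => (detected, missing)
    | some t =>
      if t = "" then (detected, missing)
      else
        let tl := PySem.Str.lower t
        (detected, missing
          ++ (if PySem.Str.isIn "tech" tl && !proj
              then ["Projects (recommended for Tech)"] else [])
          ++ (if PySem.Str.isIn "pre-health" tl && !(res || clin)
              then ["Research or Clinical Experience (recommended for Pre-Health)"] else [])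
          ++ (if PySem.Str.isIn "pre-law" tl && !(res || pub)
              then ["Research or Publications (recommended for Pre-Law)"] else []))

-- ===== PRECONDITION & SPEC =====
def Spec_check_sections_py (sections : List (String × String)) (track : Option String) (out : List String × List String) : Prop := out = check_sections_py_alt sections track
instance (sections : List (String × String)) (track : Option String) (out : List String × List String) : Decidable (Spec_check_sections_py sections track out) := by unfold Spec_check_sections_py; infer_instance

-- ===== CLAIM (what is proved, stated in full; the proofs are below) =====
def Claim_equal_check_sections_py : Prop := ∀ (sections : List (String × String)) (track : Option String), Dom_check_sections_py sections track → Spec_check_sections_py sections track (check_sections_py sections track)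

-- ===== LEMMAS AND PROOFS =====

theorem bStep_foldl (ks : List String)
    (s : PySem.Set String) (e x sk p r c pb : Bool) :
    ks.foldl bStep (s, e, x, sk, p, r, c, pb) =
      ((pvMapped ks).foldl PySem.Set.add s,
       e || (pvMapped ks).any pvEdu,
       x || (pvMapped ks).any pvExp,
       sk || (pvMapped ks).any pvSkl,
       p || (pvMapped ks).any (fun k => PySem.Str.isIn "project" k),
       r || (pvMapped ks).any (fun k => PySem.Str.isIn "research" k),
       c || (pvMapped ks).any (fun k => PySem.Str.isIn "clinical" k),
       pb || (pvMapped ks).any (fun k => PySem.Str.isIn "publication" k)) := by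
  induction ks generalizing s e x sk p r c pb with
  | nil => simp [pvMapped]
  | cons k t ih =>
    by_cases h : k = "_top" <;>
      simp [pvMapped, h, bStep, List.foldl_cons, ih, Bool.or_assoc]

theorem any_ofList (xs : List String) (q : String → Bool) :
    (PySem.Set.ofList xs).any q = xs.any q := by
  rcases h : xs.any q with _ | _
  · simp only [List.any_eq_false] at h ⊢
    intro x hx
    exact h x ((PySem.Set.mem_ofList _ _).mp hx)
  · simp only [List.any_eq_true] at h ⊢
    obtain ⟨x, hx, hq⟩ := h
    exact ⟨x, (PySem.Set.mem_ofList _ _).mpr hx, hq⟩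

theorem any_or (xs : List String) (p q : String → Bool) :
    xs.any (fun k => p k || q k) = (xs.any p || xs.any q) := by
  induction xs with
  | nil => simp
  | cons a t ih => simp [List.any_cons, ih]; ac_rfl

-- ===== VERDICT (by name: the statement is the Claim_ definition above) =====
theorem check_sections_py_spec : Claim_equal_check_sections_py := by
  intro sections track _
  unfold Spec_check_sections_py check_sections_py check_sections_py_alt
  have hf : sections.foldl (fun st kv => bStep st kv.1)
      (([] : PySem.Set String), false, false, false, false, false, false, false)
      = (sections.map Prod.fst).foldl bStep
      (([] : PySem.Set String), false, false, false, false, false, false, false) := by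
    rw [List.foldl_map]
  rw [hf, bStep_foldl]
  have hks : (pvMapped (sections.map Prod.fst)).foldl PySem.Set.add ([] : PySem.Set String)
      = pvKeys sections := by
    unfold pvKeys; exact (PySem.Set.ofList_eq_foldl _).symm
  rw [hks]
  have hdet : ∀ ks : List String,
      ks.foldl (fun acc k => acc ++ [pyTitle k]) ([] : List String) = ks.map pyTitle := by
    intro ks
    induction ks using List.reverseRecOn with
    | nil => rfl
    | append_singleton t a ih => simp [List.foldl_append, ih]
  have hedu : (fun k => (["education", "academic", "qualification"] : List String).any
      (fun ek => PySem.Str.isIn ek k)) = pvEdu := by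
    funext k; simp [pvEdu, Bool.or_assoc]
  have hexp : (fun k => (["experience", "employment", "work"] : List String).any
      (fun ek => PySem.Str.isIn ek k)) = pvExp := by
    funext k; simp [pvExp, Bool.or_assoc]
  have hskl : (fun k => (["skill", "competenc", "technical"] : List String).any
      (fun sk => PySem.Str.isIn sk k)) = pvSkl := by
    funext k; simp [pvSkl, Bool.or_assoc]
  simp only [Bool.false_or, hdet, pvKeys, any_ofList, any_or, hedu, hexp, hskl]
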